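-- pv_equiv track=rewrite | github.com/yata0/Mahjong | p2_mahjong/calculate_fan_func.py | is_quadruple_chow
-- ===== SOURCE A (Python) =====
-- def is_quadruple_chow(state, player):
--     sequences = state["pile_sequences"] + state["hand_sequences"]
--     if len(sequences) < 4:
--         return False
--     seq_head_list = []
--     for seq in sequences:
--         seq = sorted(seq)
--         seq_head_list.append(seq[0])
--     sorted_seq_head_list = sorted(seq_head_list)
--     return sorted_seq_head_list[0] == sorted_seq_head_list[3]
-- ===== SOURCE B (Python) =====
-- def is_quadruple_chow(state, player):
--     sequences = state["pile_sequences"] + state["hand_sequences"]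
--     if len(sequences) < 4:
--         return False
--     best = None
--     cnt = 0
--     for seq in sequences:
--         h = seq[0]
--         for x in seq[1:]:
--             if x < h:
--                 h = x
--         if best is None or h < best:
--             best = h
--             cnt = 1
--         elif h == best:
--             cnt += 1
--     return cnt >= 4
-- ===== Notes on version B (the rewrite author's own statement) =====
-- stated objective: alternative
-- what changed: Replaces per-sequence sorts, the intermediate head list and the final sort-then-compare-[0]/[3] with a single pass that computes each head by a manual running minimum and maintains one accumulator (smallest head seen, its multiplicity), returning multiplicity >= 4.
import Mathlib
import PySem

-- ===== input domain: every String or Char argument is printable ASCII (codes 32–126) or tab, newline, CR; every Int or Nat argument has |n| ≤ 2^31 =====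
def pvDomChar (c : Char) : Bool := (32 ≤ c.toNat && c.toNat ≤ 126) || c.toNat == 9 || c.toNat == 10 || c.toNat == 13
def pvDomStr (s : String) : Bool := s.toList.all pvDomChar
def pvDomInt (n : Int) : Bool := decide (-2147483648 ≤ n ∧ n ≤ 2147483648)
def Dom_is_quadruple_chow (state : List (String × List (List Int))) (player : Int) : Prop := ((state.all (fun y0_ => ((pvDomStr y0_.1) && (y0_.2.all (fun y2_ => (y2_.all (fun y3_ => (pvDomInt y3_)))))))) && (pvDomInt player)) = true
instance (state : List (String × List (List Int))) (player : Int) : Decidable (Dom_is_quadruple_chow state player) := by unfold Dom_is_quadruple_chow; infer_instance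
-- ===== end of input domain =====

-- B replaces sorting with a single pass: a manual running minimum per sequence and one
-- accumulator (smallest head seen so far, its multiplicity), returning multiplicity >= 4.

-- ===== PORT A =====
def is_quadruple_chow (state : List (String × List (List Int))) (player : Int) : Bool :=
  let sequences := ((PySem.Dict.mk state).get? "pile_sequences").getD []
                ++ ((PySem.Dict.mk state).get? "hand_sequences").getD []
  if sequences.length < 4 then false
  else
    let seq_head_list := sequences.foldl
      (fun acc seq => acc ++ [PySem.List.pyGetD (PySem.List.sorted seq (fun x => x) false) 0 0]) []
    let sorted_seq_head_list := PySem.List.sorted seq_head_list (fun x => x) false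
    decide (PySem.List.pyGetD sorted_seq_head_list 0 0 = PySem.List.pyGetD sorted_seq_head_list 3 0)

-- ===== PORT B =====
-- inner loop of Source B: h = seq[0]; for x in seq[1:]: if x < h: h = x
def pvRunningMin (seq : List Int) : Int :=
  (PySem.List.slice seq (some 1) none).foldl
    (fun h x => if x < h then x else h) (PySem.List.pyGetD seq 0 0)

-- outer loop of Source B: the accumulator is (best, cnt)
def pvHeadStep (st : Option Int × Int) (h : Int) : Option Int × Int :=
  match st with
  | (none, _) => (some h, 1)
  | (some b, c) => if h < b then (some h, 1) else if h == b then (some b, c + 1) else (some b, c)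

def is_quadruple_chow_alt (state : List (String × List (List Int))) (player : Int) : Bool :=
  let sequences := ((PySem.Dict.mk state).get? "pile_sequences").getD []
                ++ ((PySem.Dict.mk state).get? "hand_sequences").getD []
  if sequences.length < 4 then false
  else
    let st := sequences.foldl (fun st seq => pvHeadStep st (pvRunningMin seq)) (none, 0)
    decide (4 ≤ st.2)

-- ===== PRECONDITION & SPEC =====
-- Pre_ excludes exactly the inputs on which A raises: a missing "pile_sequences"/"hand_sequences"
-- key (KeyError), or an empty sequence when at least 4 sequences are present (IndexError on sorted(seq)[0]).
def Pre_is_quadruple_chow (state : List (String × List (List Int))) (player : Int) : Prop :=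
  ((PySem.Dict.mk state).get? "pile_sequences").isSome = true ∧
  ((PySem.Dict.mk state).get? "hand_sequences").isSome = true ∧
  (4 ≤ (((PySem.Dict.mk state).get? "pile_sequences").getD []
        ++ ((PySem.Dict.mk state).get? "hand_sequences").getD []).length →
    ∀ seq ∈ ((PySem.Dict.mk state).get? "pile_sequences").getD []
          ++ ((PySem.Dict.mk state).get? "hand_sequences").getD [], seq ≠ [])
instance (state : List (String × List (List Int))) (player : Int) : Decidable (Pre_is_quadruple_chow state player) := by unfold Pre_is_quadruple_chow; infer_instance

def pvWitness_is_quadruple_chow : (List (String × List (List Int))) × Int :=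
  ([("pile_sequences", [[3, 1, 2], [1, 2, 3]]), ("hand_sequences", [[2, 3, 1], [1, 2, 3]])], 0)

def Spec_is_quadruple_chow (state : List (String × List (List Int))) (player : Int) (out : Bool) : Prop := out = is_quadruple_chow_alt state player
instance (state : List (String × List (List Int))) (player : Int) (out : Bool) : Decidable (Spec_is_quadruple_chow state player out) := by unfold Spec_is_quadruple_chow; infer_instance

-- ===== CLAIM (what is proved, stated in full; the proofs are below) =====
def Claim_equal_is_quadruple_chow : Prop := ∀ (state : List (String × List (List Int))) (player : Int), Dom_is_quadruple_chow state player → Pre_is_quadruple_chow state player → Spec_is_quadruple_chow state player (is_quadruple_chow state player)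

-- ===== LEMMAS AND PROOFS =====

-- first element of the Python sort = minimum of the list, for a nonempty list
lemma head_sorted_eq_min (seq : List Int) (h : seq ≠ []) :
    PySem.List.pyGetD (PySem.List.sorted seq (fun x => x) false) 0 0
      = (PySem.List.min? seq (fun x => x)).getD 0 := by
  obtain ⟨a, t, hs⟩ : ∃ a t, PySem.List.sorted seq (fun x => x) false = a :: t := by
    rcases hsr : PySem.List.sorted seq (fun x => x) false with _ | ⟨a, t⟩
    · exact absurd ((PySem.List.sorted_eq_nil_iff _ _ _).1 hsr) h
    · exact ⟨a, t, rfl⟩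
  obtain ⟨m, hm⟩ : ∃ m, PySem.List.min? seq (fun x => x) = some m := by
    rcases hmr : PySem.List.min? seq (fun x => x) with _ | m
    · exact absurd ((PySem.List.min?_eq_none_iff _ _).1 hmr) h
    · exact ⟨m, rfl⟩
  have ha : a ∈ seq := (PySem.List.mem_sorted _ _ _ _).1 (hs ▸ List.mem_cons_self ..)
  have h1 : ∀ y ∈ seq, a ≤ y := PySem.List.key_head_sorted_le _ _ hs
  have h2 : ∀ y ∈ seq, m ≤ y := PySem.List.min?_isMin hm
  rw [hs, hm, PySem.List.pyGetD_zero_cons]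
  exact le_antisymm (h1 m (PySem.List.min?_mem hm)) (h2 a ha)

-- the manual 'if x < h' loop is the running-min fold, hence = min(seq)
lemma foldl_ifmin (t : List Int) (a : Int) :
    t.foldl (fun h x => if x < h then x else h) a = t.foldl min a := by
  induction t generalizing a with
  | nil => rfl
  | cons x t ih =>
      simp only [List.foldl_cons, ih]
      congr 1
      rw [min_def]; split_ifs <;> omega

lemma runningMin_eq_min (seq : List Int) (h : seq ≠ []) :
    pvRunningMin seq = (PySem.List.min? seq (fun x => x)).getD 0 := by
  obtain ⟨a, t, rfl⟩ := List.exists_cons_of_ne_nil h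
  unfold pvRunningMin
  rw [PySem.List.slice_from_one, PySem.List.min?_id_cons]
  simp [foldl_ifmin]

-- the accumulator fold computes (min of hs, multiplicity of that min)
lemma fold_headStep (hs : List Int) (h : hs ≠ []) :
    hs.foldl pvHeadStep (none, 0)
      = (PySem.List.min? hs (fun x => x),
         (hs.count ((PySem.List.min? hs (fun x => x)).getD 0) : Int)) := by
  induction hs using List.reverseRecOn with
  | nil => exact absurd rfl h
  | append_singleton l x ih =>
      rcases eq_or_ne l [] with rfl | hl
      · simp [pvHeadStep, PySem.List.min?_id_cons]
      · obtain ⟨a, t, rfl⟩ := List.exists_cons_of_ne_nil hl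
        rw [List.foldl_append, ih hl]
        obtain ⟨m, hm⟩ : ∃ m, PySem.List.min? (a :: t) (fun x => x) = some m := by
          rcases hmr : PySem.List.min? (a :: t) (fun x => x) with _ | m
          · exact absurd ((PySem.List.min?_eq_none_iff _ _).1 hmr) hl
          · exact ⟨m, rfl⟩
        have hmmin : ∀ y ∈ a :: t, m ≤ y := PySem.List.min?_isMin hm
        have hmem : m ∈ a :: t := PySem.List.min?_mem hm
        have hcons : a :: t ++ [x] = a :: (t ++ [x]) := rfl
        have hfold : PySem.List.min? (a :: t) (fun x => x) = some (t.foldl min a) :=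
          PySem.List.min?_id_cons ..
        have hmval : t.foldl min a = m := by rw [hfold] at hm; exact Option.some.inj hm
        have hmin' : PySem.List.min? (a :: t ++ [x]) (fun x => x) = some (min m x) := by
          rw [hcons, PySem.List.min?_id_cons, List.foldl_append, hmval]
          rfl
        rw [hm, hmin']
        simp only [List.foldl_cons, Option.getD_some, pvHeadStep]
        by_cases h1 : x < m
        · have hx0 : (a :: t).count x = 0 := by
            rw [List.count_eq_zero]
            intro hx
            exact absurd (hmmin x hx) (by omega)
          simp only [if_pos h1]
          rw [min_eq_right (by omega : x ≤ m)]
          rw [List.count_append, hx0]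
          simp
        · have hmx : min m x = m := min_eq_left (by omega)
          rw [if_neg h1, hmx]
          by_cases h2 : x = m
          · subst h2
            have hc : List.count x (a :: (t ++ [x])) = List.count x (a :: t) + 1 := by
              simp [List.count_cons, List.count_append]
              omega
            simp [hc]
          · have hb : (x == m) = false := by simp [h2]
            have hc : List.count m (a :: (t ++ [x])) = List.count m (a :: t) := by
              simp [List.count_cons, List.count_append, h2]
            simp [hb, hc]

-- the core count characterisation: on a list with ≥ 4 elements,
-- sorted(xs)[0] == sorted(xs)[3]  ↔  xs.count(min(xs)) ≥ 4
lemma sorted03_iff_count (xs : List Int) (hlen : 4 ≤ xs.length) :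
    (PySem.List.pyGetD (PySem.List.sorted xs (fun x => x) false) 0 0
      = PySem.List.pyGetD (PySem.List.sorted xs (fun x => x) false) 3 0)
    ↔ (4 ≤ xs.count ((PySem.List.min? xs (fun x => x)).getD 0)) := by
  have hne : xs ≠ [] := by intro h; subst h; simp at hlen
  obtain ⟨m, hm⟩ : ∃ m, PySem.List.min? xs (fun x => x) = some m := by
    rcases hmr : PySem.List.min? xs (fun x => x) with _ | m
    · exact absurd ((PySem.List.min?_eq_none_iff _ _).1 hmr) hne
    · exact ⟨m, rfl⟩
  set s := PySem.List.sorted xs (fun x => x) false with hsdef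
  have hperm : s.Perm xs := PySem.List.sorted_perm ..
  have hslen : s.length = xs.length := hperm.length_eq
  have h0 : (0:Nat) < s.length := by omega
  have h3 : (3:Nat) < s.length := by omega
  have hmin : ∀ y ∈ xs, m ≤ y := PySem.List.min?_isMin hm
  have hmins : ∀ y ∈ s, m ≤ y := fun y hy => hmin y (hperm.mem_iff.mp hy)
  have hmono : ∀ p q : Nat, (hpq : p ≤ q) → (hq : q < s.length) → s[p]'(Nat.lt_of_le_of_lt hpq hq) ≤ s[q]'hq := by
    intro p q hpq hq
    exact PySem.List.sorted_id_getElem_mono xs hpq hq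
  have hs0 : s[0]'h0 = m := by
    have h1 : ∀ y ∈ s, s[0]'h0 ≤ y := by
      intro y hy
      obtain ⟨j, hj, hjy⟩ := List.mem_iff_getElem.1 hy
      exact hjy ▸ hmono 0 j (Nat.zero_le _) hj
    exact le_antisymm (h1 m (hperm.mem_iff.mpr (PySem.List.min?_mem hm)))
      (hmins _ (s.getElem_mem h0))
  have hg0 : PySem.List.pyGetD s 0 0 = s[0]'h0 := PySem.List.pyGetD_ofNat s 0 0 h0
  have hg3 : PySem.List.pyGetD s 3 0 = s[3]'h3 := PySem.List.pyGetD_ofNat s 3 0 h3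
  have hcnt : xs.count m = s.count m := (hperm.count_eq m).symm
  rw [hm, hg0, hg3, hs0]
  simp only [Option.getD_some, hcnt]
  constructor
  · intro hEq
    have htake : s.take 4 = [m, m, m, m] := by
      apply List.ext_getElem
      · simp; omega
      · intro i hi1 hi2
        simp only [List.getElem_take]
        have hi4 : i < 4 := by simpa using hi2
        have hilen : i < s.length := by omega
        have hle1 : m ≤ s[i]'hilen := hmins _ (List.mem_iff_getElem.2 ⟨i, hilen, rfl⟩)
        have hle2 : s[i]'hilen ≤ s[3]'h3 := hmono i 3 (by omega) h3
        have hsi : s[i]'hilen = m := le_antisymm (by rw [← hEq] at hle2; exact hle2) hle1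
        interval_cases i <;> simpa using hsi
    calc (4:Nat) = (s.take 4).count m := by rw [htake]; simp
      _ ≤ s.count m := by
          conv_rhs => rw [← List.take_append_drop 4 s]
          rw [List.count_append]; omega
  · intro hc
    by_contra hne3
    have hlt : m < s[3]'h3 := lt_of_le_of_ne (hmins _ (s.getElem_mem h3)) hne3
    have hdrop : (s.drop 3).count m = 0 := by
      rw [List.count_eq_zero]
      intro hmem
      obtain ⟨j, hj, hjm⟩ := List.mem_iff_getElem.1 hmem
      rw [List.getElem_drop] at hjm
      have : s[3]'h3 ≤ s[3 + j]'(by simp at hj; omega) := hmono 3 (3 + j) (by omega) _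
      omega
    have htakec : (s.take 3).count m ≤ 3 := le_trans (List.count_le_length) (by simp)
    have : s.count m ≤ 3 := by
      conv_lhs => rw [← List.take_append_drop 3 s]
      rw [List.count_append, hdrop]; omega
    omega

-- ===== VERDICT (by name: the statement is the Claim_ definition above) =====
theorem is_quadruple_chow_spec : Claim_equal_is_quadruple_chow := by
  intro state player _hdom hpre
  obtain ⟨-, -, hnn⟩ := hpre
  unfold Spec_is_quadruple_chow is_quadruple_chow is_quadruple_chow_alt
  set sequences := ((PySem.Dict.mk state).get? "pile_sequences").getD []
                ++ ((PySem.Dict.mk state).get? "hand_sequences").getD [] with hseq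
  by_cases hlen : sequences.length < 4
  · simp [hlen]
  · simp only [hlen, if_false]
    have hlen4 : 4 ≤ sequences.length := by omega
    have hne : ∀ seq ∈ sequences, seq ≠ [] := hnn hlen4
    set heads := sequences.map (fun seq => (PySem.List.min? seq (fun x => x)).getD 0) with hheadsdef
    have hheadsA : sequences.foldl
        (fun acc seq => acc ++ [PySem.List.pyGetD (PySem.List.sorted seq (fun x => x) false) 0 0]) []
        = heads := by
      rw [PySem.List.foldl_append_singleton_eq_map]
      exact List.map_congr_left (fun seq hs => head_sorted_eq_min seq (hne seq hs))
    have hheadsB : sequences.foldl (fun st seq => pvHeadStep st (pvRunningMin seq)) ((none : Option Int), (0:Int))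
        = heads.foldl pvHeadStep (none, 0) := by
      rw [hheadsdef, List.foldl_map]
      apply PySem.List.foldl_congr_mem
      intro acc seq hs
      rw [runningMin_eq_min seq (hne seq hs)]
    have hheadsne : heads ≠ [] := by
      intro hc
      rw [hheadsdef, List.map_eq_nil_iff] at hc
      rw [hc] at hlen4
      simp at hlen4
    rw [hheadsA, hheadsB, fold_headStep heads hheadsne]
    have hlenm : 4 ≤ heads.length := by rw [hheadsdef]; simpa using hlen4
    rw [decide_eq_decide]
    rw [sorted03_iff_count heads hlenm]
    simp only []
    constructor <;> intro hcc <;> exact_mod_cast hcc
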